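-- pv_equiv track=rewrite | github.com/dadwadw233/agentop | agent_monitor/parsers/cursor_cookie.py | _cookie_header_from_map
-- ===== SOURCE A (Python) =====
-- from typing import Optional
--
-- def _cookie_header_from_map(cookies: dict[str, str]) -> Optional[str]:
--     if not cookies:
--         return None
--     if "WorkosCursorSessionToken" not in cookies:
--         return None
--     preferred = [
--         "WorkosCursorSessionToken",
--         "cursor_anonymous_id",
--         "htjs_anonymous_id",
--         "htjs_sesh",
--     ]
--     ordered = []
--     for name in preferred:
--         if name in cookies:
--             ordered.append(f"{name}={cookies[name]}")
--     for name, value in cookies.items():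
--         if name in preferred:
--             continue
--         ordered.append(f"{name}={value}")
--     return "; ".join(ordered)
-- ===== SOURCE B (Python) =====
-- from typing import Optional
--
-- def _cookie_header_from_map(cookies: dict[str, str]) -> Optional[str]:
--     if not cookies:
--         return None
--     if "WorkosCursorSessionToken" not in cookies:
--         return None
--     preferred = [
--         "WorkosCursorSessionToken",
--         "cursor_anonymous_id",
--         "htjs_anonymous_id",
--         "htjs_sesh",
--     ]
--     rank = {name: i for i, name in enumerate(preferred)}
--     buckets = [[] for _ in range(len(preferred) + 1)]
--     for name, value in cookies.items():
--         buckets[rank.get(name, len(preferred))].append(f"{name}={value}")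
--     return "; ".join(part for bucket in buckets for part in bucket)
-- ===== Notes on version B (the rewrite author's own statement) =====
-- stated objective: alternative
-- what changed: A assembles the header in two phases (a scan over the four preferred names with a dict lookup each, then a second pass over the dict for the remaining cookies); B makes a single pass over the items, distributing each cookie into one of five rank buckets (rank map built once from the preferred list) and then joins the concatenated buckets.
import Mathlib
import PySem

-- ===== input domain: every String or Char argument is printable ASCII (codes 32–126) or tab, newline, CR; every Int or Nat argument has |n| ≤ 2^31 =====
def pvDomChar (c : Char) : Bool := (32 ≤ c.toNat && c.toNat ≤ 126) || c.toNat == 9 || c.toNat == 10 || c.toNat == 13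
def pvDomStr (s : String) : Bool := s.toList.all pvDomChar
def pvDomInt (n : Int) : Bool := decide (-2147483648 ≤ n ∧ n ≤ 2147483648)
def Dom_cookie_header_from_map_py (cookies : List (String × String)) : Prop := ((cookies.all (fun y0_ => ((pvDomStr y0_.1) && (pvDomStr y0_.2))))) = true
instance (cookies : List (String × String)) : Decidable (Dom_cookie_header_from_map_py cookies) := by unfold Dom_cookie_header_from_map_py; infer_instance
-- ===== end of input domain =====

-- B replaces A's two-phase assembly (a scan over the preferred names with a lookup
-- each, then a second pass over the dict for the rest) with a single bucket pass
-- over the items, distributing each cookie by its rank; objective: alternative.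

def pvPreferred : List String :=
  ["WorkosCursorSessionToken", "cursor_anonymous_id", "htjs_anonymous_id", "htjs_sesh"]

-- ===== PORT A =====
def cookie_header_from_map_py (cookies : List (String × String)) : Option String :=
  if cookies = [] then none
  else if (cookies.find? (fun p => p.1 == "WorkosCursorSessionToken")).isNone then none
  else
    let ordered := pvPreferred.foldl (fun acc name =>
      match cookies.find? (fun p => p.1 == name) with
      | some p => acc ++ [name ++ "=" ++ p.2]
      | none => acc) []
    let ordered := cookies.foldl (fun acc p =>
      if pvPreferred.contains p.1 then acc else acc ++ [p.1 ++ "=" ++ p.2]) ordered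
    some (PySem.Str.join "; " ordered)

-- ===== PORT B =====
def cookie_header_from_map_py_alt (cookies : List (String × String)) : Option String :=
  if cookies = [] then none
  else if (cookies.find? (fun p => p.1 == "WorkosCursorSessionToken")).isNone then none
  else
    let rank : PySem.Dict String Int :=
      PySem.Dict.ofList ((PySem.List.enumerate pvPreferred 0).map (fun p => (p.2, p.1)))
    let buckets : List (List String) := List.replicate (pvPreferred.length + 1) []
    let buckets := cookies.foldl (fun acc p =>
      PySem.List.pySetD acc (rank.getD p.1 (pvPreferred.length : Int))
        ((PySem.List.pyGetD acc (rank.getD p.1 (pvPreferred.length : Int)) []) ++ [p.1 ++ "=" ++ p.2]))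
      buckets
    some (PySem.Str.join "; " buckets.flatten)

-- ===== PRECONDITION & SPEC =====
-- Pre_ excludes association lists with duplicate keys: they do not encode any Python
-- dict (a dict cannot hold the same key twice), so neither Python ever receives them.
def Pre_cookie_header_from_map_py (cookies : List (String × String)) : Prop :=
  (cookies.map Prod.fst).Nodup
instance (cookies : List (String × String)) : Decidable (Pre_cookie_header_from_map_py cookies) := by
  unfold Pre_cookie_header_from_map_py; infer_instance

def pvWitness_cookie_header_from_map_py : (List (String × String)) :=
  [("WorkosCursorSessionToken", "abc"), ("theme", "dark")]

def Spec_cookie_header_from_map_py (cookies : List (String × String)) (out : Option String) : Prop :=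
  out = cookie_header_from_map_py_alt cookies
instance (cookies : List (String × String)) (out : Option String) : Decidable (Spec_cookie_header_from_map_py cookies out) := by
  unfold Spec_cookie_header_from_map_py; infer_instance

-- ===== CLAIM (what is proved, stated in full; the proofs are below) =====
def Claim_equal_cookie_header_from_map_py : Prop := ∀ (cookies : List (String × String)), Dom_cookie_header_from_map_py cookies → Pre_cookie_header_from_map_py cookies → Spec_cookie_header_from_map_py cookies (cookie_header_from_map_py cookies)

-- ===== LEMMAS AND PROOFS =====

-- rank of a cookie name: its position among the preferred names, 4 for the rest
def pvRk (s : String) : Nat :=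
  if s == "WorkosCursorSessionToken" then 0
  else if s == "cursor_anonymous_id" then 1
  else if s == "htjs_anonymous_id" then 2
  else if s == "htjs_sesh" then 3 else 4

-- the formatted parts of the cookies of a given rank, in input order
def pvF (i : Nat) (cs : List (String × String)) : List String :=
  (cs.filter (fun p => pvRk p.1 == i)).map (fun p => p.1 ++ "=" ++ p.2)

-- B's loop body, with the rank lookup already evaluated
def pvStep (acc : List (List String)) (p : String × String) : List (List String) :=
  acc.set (pvRk p.1) ((acc.getD (pvRk p.1) []) ++ [p.1 ++ "=" ++ p.2])

theorem pvEmptyGet (s : String) : (PySem.Dict.mk ([] : List (String × Int))).get? s = none := rfl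

theorem pvRank_getD (s : String) :
    (PySem.Dict.mk [("WorkosCursorSessionToken", (0 : Int)), ("cursor_anonymous_id", 1),
        ("htjs_anonymous_id", 2), ("htjs_sesh", 3)]).getD s 4 = (pvRk s : Int) := by
  simp only [PySem.Dict.getD_eq_get?_getD, PySem.Dict.get?_mk_cons, pvRk]
  by_cases h0 : s = "WorkosCursorSessionToken" <;>
  by_cases h1 : s = "cursor_anonymous_id" <;>
  by_cases h2 : s = "htjs_anonymous_id" <;>
  by_cases h3 : s = "htjs_sesh" <;>
  simp_all [@eq_comm String s, pvEmptyGet] <;> subst_vars <;> decide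

theorem pvRk_eq_zero (s : String) : (pvRk s == 0) = (s == "WorkosCursorSessionToken") := by
  unfold pvRk; split_ifs <;> simp_all

theorem pvRk_eq_one (s : String) : (pvRk s == 1) = (s == "cursor_anonymous_id") := by
  unfold pvRk; split_ifs <;> simp_all

theorem pvRk_eq_two (s : String) : (pvRk s == 2) = (s == "htjs_anonymous_id") := by
  unfold pvRk; split_ifs <;> simp_all

theorem pvRk_eq_three (s : String) : (pvRk s == 3) = (s == "htjs_sesh") := by
  unfold pvRk; split_ifs <;> simp_all

theorem pvRk_eq_four (s : String) : (pvRk s == 4) = !(pvPreferred.contains s) := by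
  unfold pvRk pvPreferred
  by_cases h0 : s = "WorkosCursorSessionToken" <;>
  by_cases h1 : s = "cursor_anonymous_id" <;>
  by_cases h2 : s = "htjs_anonymous_id" <;>
  by_cases h3 : s = "htjs_sesh" <;>
  simp_all [@eq_comm String s] <;> subst_vars <;> decide

theorem pvF_cons (i : Nat) (p : String × String) (t : List (String × String)) :
    pvF i (p :: t) = (if pvRk p.1 == i then [p.1 ++ "=" ++ p.2] else []) ++ pvF i t := by
  simp only [pvF, List.filter_cons]
  split <;> simp

theorem pvRk_le (s : String) : pvRk s = 0 ∨ pvRk s = 1 ∨ pvRk s = 2 ∨ pvRk s = 3 ∨ pvRk s = 4 := by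
  unfold pvRk; split_ifs <;> simp

-- B's single pass fills the five buckets with the rank-0 … rank-4 parts
theorem pvBuckets (cs : List (String × String)) :
    ∀ b0 b1 b2 b3 b4 : List String,
    cs.foldl pvStep [b0, b1, b2, b3, b4]
      = [b0 ++ pvF 0 cs, b1 ++ pvF 1 cs, b2 ++ pvF 2 cs, b3 ++ pvF 3 cs, b4 ++ pvF 4 cs] := by
  induction cs with
  | nil => intro b0 b1 b2 b3 b4; simp [pvF]
  | cons p t ih =>
    intro b0 b1 b2 b3 b4
    rw [List.foldl_cons]
    rcases pvRk_le p.1 with h | h | h | h | h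
    · have hs : pvStep [b0, b1, b2, b3, b4] p = [b0 ++ [p.1 ++ "=" ++ p.2], b1, b2, b3, b4] := by
        simp [pvStep, h]
      rw [hs, ih]; simp [pvF_cons, h]
    · have hs : pvStep [b0, b1, b2, b3, b4] p = [b0, b1 ++ [p.1 ++ "=" ++ p.2], b2, b3, b4] := by
        simp [pvStep, h]
      rw [hs, ih]; simp [pvF_cons, h]
    · have hs : pvStep [b0, b1, b2, b3, b4] p = [b0, b1, b2 ++ [p.1 ++ "=" ++ p.2], b3, b4] := by
        simp [pvStep, h]
      rw [hs, ih]; simp [pvF_cons, h]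
    · have hs : pvStep [b0, b1, b2, b3, b4] p = [b0, b1, b2, b3 ++ [p.1 ++ "=" ++ p.2], b4] := by
        simp [pvStep, h]
      rw [hs, ih]; simp [pvF_cons, h]
    · have hs : pvStep [b0, b1, b2, b3, b4] p = [b0, b1, b2, b3, b4 ++ [p.1 ++ "=" ++ p.2]] := by
        simp [pvStep, h]
      rw [hs, ih]; simp [pvF_cons, h]

-- with unique keys, the cookies filtered to one key are exactly the first find?
theorem pvFindFilter (cs : List (String × String)) (h : (cs.map Prod.fst).Nodup) (n : String) :
    (cs.filter (fun p => p.1 == n)).map (fun p => p.1 ++ "=" ++ p.2)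
      = (match cs.find? (fun p => p.1 == n) with
         | some p => [n ++ "=" ++ p.2]
         | none => ([] : List String)) := by
  induction cs with
  | nil => rfl
  | cons q t ih =>
    simp only [List.map, List.nodup_cons] at h
    by_cases hq : q.1 = n
    · have hfilter : t.filter (fun p => p.1 == n) = [] := by
        apply List.filter_eq_nil_iff.mpr
        intro p hp hbeq
        exact h.1 (hq ▸ (by simpa using hbeq) ▸ (List.mem_map_of_mem hp))
      simp [hq, hfilter]
    · simp only [List.filter_cons, List.find?_cons]
      have : (q.1 == n) = false := by simpa using hq
      simp [this, ih h.2]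

theorem pvMatchAppend (e : Option (String × String)) (acc : List String) (f : String × String → String) :
    (match e with | some p => acc ++ [f p] | none => acc)
      = acc ++ (match e with | some p => [f p] | none => []) := by
  cases e <;> simp

-- ===== VERDICT (by name: the statement is the Claim_ definition above) =====
theorem cookie_header_from_map_py_spec : Claim_equal_cookie_header_from_map_py := by
  intro cookies _ hpre
  unfold Spec_cookie_header_from_map_py
  unfold cookie_header_from_map_py cookie_header_from_map_py_alt
  split_ifs with h1 h2
  · rfl
  · rfl
  · -- B side: evaluate the rank dict and reduce the bucket loop to pvStep
    dsimp only
    have hfun : (fun (acc : List (List String)) (p : String × String) =>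
        PySem.List.pySetD acc
          (((PySem.Dict.ofList ((PySem.List.enumerate pvPreferred 0).map (fun p => (p.2, p.1)))).getD p.1 (pvPreferred.length : Int)))
          ((PySem.List.pyGetD acc
            (((PySem.Dict.ofList ((PySem.List.enumerate pvPreferred 0).map (fun p => (p.2, p.1)))).getD p.1 (pvPreferred.length : Int))) []) ++ [p.1 ++ "=" ++ p.2]))
        = pvStep := by
      funext acc p
      have hdict : (PySem.Dict.ofList ((PySem.List.enumerate pvPreferred 0).map (fun p => (p.2, p.1))))
          = PySem.Dict.mk [("WorkosCursorSessionToken", (0 : Int)), ("cursor_anonymous_id", 1),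
              ("htjs_anonymous_id", 2), ("htjs_sesh", 3)] := by rfl
      have hlen : (pvPreferred.length : Int) = ((4 : Nat) : Int) := by rfl
      rw [hdict, hlen]
      have := pvRank_getD p.1
      rw [(by rfl : ((4 : Nat) : Int) = (4 : Int))] at *
      rw [this]
      simp [pvStep, PySem.List.pyGetD]
    have hrepl : List.replicate (pvPreferred.length + 1) ([] : List String) = [[], [], [], [], []] := by rfl
    rw [hfun, hrepl, pvBuckets]
    -- A side: flip the second pass into append-if form, then unfold the preferred-name loop
    rw [PySem.List.foldl_congr_mem cookies
          (fun acc p => if pvPreferred.contains p.1 then acc else acc ++ [p.1 ++ "=" ++ p.2])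
          (fun acc p => if (!(pvPreferred.contains p.1)) then acc ++ [p.1 ++ "=" ++ p.2] else acc)
          _
          (by intro acc p _
              cases hc : pvPreferred.contains p.1 <;> simp_all),
        PySem.List.foldl_append_if]
    simp only [pvPreferred, List.foldl_cons, List.foldl_nil, pvMatchAppend]
    -- rewrite each of the five pieces as pvF i cookies
    have e0 : pvF 0 cookies = (match cookies.find? (fun p => p.1 == "WorkosCursorSessionToken") with
        | some p => ["WorkosCursorSessionToken" ++ "=" ++ p.2] | none => []) := by
      rw [pvF, List.filter_congr (fun p _ => pvRk_eq_zero p.1), pvFindFilter cookies hpre]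
    have e1 : pvF 1 cookies = (match cookies.find? (fun p => p.1 == "cursor_anonymous_id") with
        | some p => ["cursor_anonymous_id" ++ "=" ++ p.2] | none => []) := by
      rw [pvF, List.filter_congr (fun p _ => pvRk_eq_one p.1), pvFindFilter cookies hpre]
    have e2 : pvF 2 cookies = (match cookies.find? (fun p => p.1 == "htjs_anonymous_id") with
        | some p => ["htjs_anonymous_id" ++ "=" ++ p.2] | none => []) := by
      rw [pvF, List.filter_congr (fun p _ => pvRk_eq_two p.1), pvFindFilter cookies hpre]
    have e3 : pvF 3 cookies = (match cookies.find? (fun p => p.1 == "htjs_sesh") with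
        | some p => ["htjs_sesh" ++ "=" ++ p.2] | none => []) := by
      rw [pvF, List.filter_congr (fun p _ => pvRk_eq_three p.1), pvFindFilter cookies hpre]
    have e4 : pvF 4 cookies = (cookies.filter (fun (p : String × String) =>
          !(List.contains ["WorkosCursorSessionToken", "cursor_anonymous_id",
            "htjs_anonymous_id", "htjs_sesh"] p.1))).map (fun p => p.1 ++ "=" ++ p.2) := by
      rw [pvF, List.filter_congr (fun p _ => pvRk_eq_four p.1)]
      simp only [pvPreferred, List.contains_eq_mem]
    rw [← e0, ← e1, ← e2, ← e3, ← e4]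
    simp [List.append_assoc]
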